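-- pv_equiv track=rewrite | github.com/Dixon-SS03/Proyecto_MA0322 | MA0322/models/planos_model.py | valores_enteros
-- ===== SOURCE A (Python) =====
-- def valores_enteros(valor: str):
--     if valor == "":
--         return False
--     i = 0
--
--     if valor[0] == "+" or valor[0] == "-":
--         if len(valor) == 1:
--             return False
--         i = 1
--
--     while i < len(valor):
--         c = valor[i]
--         digitos = False
--         for d in "0123456789":
--             if c == d:
--                 digitos = True
--                 break
--         if not digitos:
--             return False
--         i += 1
--     return True
-- ===== SOURCE B (Python) =====
-- import re
--
-- _INT_RE = re.compile(r'[+-]?[0-9]+')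
--
-- def valores_enteros(valor: str):
--     return _INT_RE.fullmatch(valor) is not None
-- ===== Notes on version B (the rewrite author's own statement) =====
-- stated objective: idiomatic
-- what changed: Replaced the explicit index walk with a nested digit-comparison loop by a single compiled-regex fullmatch of the pattern [+-]?[0-9]+.
import Mathlib
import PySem

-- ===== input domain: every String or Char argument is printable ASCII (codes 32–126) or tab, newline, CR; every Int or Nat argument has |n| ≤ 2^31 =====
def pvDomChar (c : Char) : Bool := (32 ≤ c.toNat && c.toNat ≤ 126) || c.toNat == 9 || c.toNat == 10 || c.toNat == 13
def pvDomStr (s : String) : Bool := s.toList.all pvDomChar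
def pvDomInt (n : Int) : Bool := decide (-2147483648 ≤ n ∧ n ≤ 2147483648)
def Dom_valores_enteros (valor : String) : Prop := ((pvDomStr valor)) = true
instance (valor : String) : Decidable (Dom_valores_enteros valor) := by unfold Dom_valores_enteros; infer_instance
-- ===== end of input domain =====

-- B replaces A's explicit index walk and nested digit-comparison loop by a single
-- compiled-regex fullmatch of [+-]?[0-9]+ (idiomatic); exact same Boolean result.


-- ===== PORT A =====
-- inner `for d in "0123456789": if c = d: digitos := true; break`
def pvDigitosLoop (c : Char) : Bool := ("0123456789".toList).any (fun d => c == d)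

-- `while i < len(valor): …` walked as recursion over the remaining suffix of characters
def pvWhileA : List Char → Bool
  | [] => true
  | c :: rest => if pvDigitosLoop c then pvWhileA rest else false

def valores_enteros (valor : String) : Bool :=
  if valor = "" then false
  else
    let l := valor.toList
    if l.headD ' ' = '+' ∨ l.headD ' ' = '-' then
      if l.length = 1 then false else pvWhileA l.tail
    else pvWhileA l

-- ===== PORT B =====
-- the regex character class [0-9]
def pvIsDigitClass (c : Char) : Bool := decide ('0' ≤ c) && decide (c ≤ '9')

-- the regex piece [0-9]+ : one or more digits
def pvDigitsPlus (l : List Char) : Bool := decide (l ≠ []) && l.all pvIsDigitClass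

-- fullmatch of [+-]?[0-9]+ : optional sign, then one-or-more digits
def valores_enteros_alt (valor : String) : Bool :=
  match valor.toList with
  | [] => false
  | c :: rest => if c = '+' || c = '-' then pvDigitsPlus rest else pvDigitsPlus (c :: rest)

-- ===== PRECONDITION & SPEC =====
def Spec_valores_enteros (valor : String) (out : Bool) : Prop := out = valores_enteros_alt valor
instance (valor : String) (out : Bool) : Decidable (Spec_valores_enteros valor out) := by unfold Spec_valores_enteros; infer_instance

-- ===== CLAIM (what is proved, stated in full; the proofs are below) =====
def Claim_equal_valores_enteros : Prop := ∀ (valor : String), Dom_valores_enteros valor → Spec_valores_enteros valor (valores_enteros valor)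

-- ===== LEMMAS AND PROOFS =====
theorem char_eq_of_toNat (c d : Char) (h : c.toNat = d.toNat) : c = d :=
  Char.ext (UInt32.toNat_inj.mp h)

theorem pvDigitosLoop_eq (c : Char) : pvDigitosLoop c = pvIsDigitClass c := by
  unfold pvDigitosLoop pvIsDigitClass
  have hlo : ('0' ≤ c) ↔ 48 ≤ c.toNat := by
    rw [Char.le_def, UInt32.le_iff_toNat_le]; rfl
  have hhi : (c ≤ '9') ↔ c.toNat ≤ 57 := by
    rw [Char.le_def, UInt32.le_iff_toNat_le]; rfl
  cases hb : (decide ('0' ≤ c) && decide (c ≤ '9')) with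
  | true =>
      rw [Bool.and_eq_true, decide_eq_true_iff, decide_eq_true_iff, hlo, hhi] at hb
      have hv : c.toNat = 48 ∨ c.toNat = 49 ∨ c.toNat = 50 ∨ c.toNat = 51 ∨ c.toNat = 52 ∨
             c.toNat = 53 ∨ c.toNat = 54 ∨ c.toNat = 55 ∨ c.toNat = 56 ∨ c.toNat = 57 := by omega
      rcases hv with h|h|h|h|h|h|h|h|h|h <;>
        first
          | (rw [char_eq_of_toNat c '0' h]; decide)
          | (rw [char_eq_of_toNat c '1' h]; decide)
          | (rw [char_eq_of_toNat c '2' h]; decide)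
          | (rw [char_eq_of_toNat c '3' h]; decide)
          | (rw [char_eq_of_toNat c '4' h]; decide)
          | (rw [char_eq_of_toNat c '5' h]; decide)
          | (rw [char_eq_of_toNat c '6' h]; decide)
          | (rw [char_eq_of_toNat c '7' h]; decide)
          | (rw [char_eq_of_toNat c '8' h]; decide)
          | (rw [char_eq_of_toNat c '9' h]; decide)
  | false =>
      rw [List.any_eq_false]
      intro d hd
      have hd' : d = '0' ∨ d = '1' ∨ d = '2' ∨ d = '3' ∨ d = '4' ∨ d = '5' ∨ d = '6' ∨
          d = '7' ∨ d = '8' ∨ d = '9' := by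
        simpa [show "0123456789".toList = ['0','1','2','3','4','5','6','7','8','9'] from rfl]
          using hd
      simp only [beq_iff_eq]
      rcases hd' with rfl|rfl|rfl|rfl|rfl|rfl|rfl|rfl|rfl|rfl <;>
        (rintro rfl; exact absurd hb (by decide))

theorem pvWhileA_eq_all (l : List Char) : pvWhileA l = l.all pvIsDigitClass := by
  induction l with
  | nil => rfl
  | cons c rest ih =>
      rw [pvWhileA, pvDigitosLoop_eq, List.all_cons, ih]
      by_cases h : pvIsDigitClass c = true <;> simp [h]

-- ===== VERDICT (by name: the statement is the Claim_ definition above) =====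
theorem valores_enteros_spec : Claim_equal_valores_enteros := by
  intro valor _
  unfold Spec_valores_enteros valores_enteros valores_enteros_alt
  by_cases he : valor = ""
  · subst he; rfl
  · simp only [he, if_false]
    have hne : valor.toList ≠ [] := by simp [String.toList_eq_nil_iff, he]
    cases hl : valor.toList with
    | nil => exact absurd hl hne
    | cons c rest =>
        simp only [List.headD, List.tail, List.length_cons]
        by_cases hs : c = '+' ∨ c = '-'
        · have hs' : (c = '+' || c = '-') = true := by
            rcases hs with h | h <;> simp [h]
          simp only [hs, if_true, hs', if_true]
          by_cases hr : rest = []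
          · subst hr; simp [pvDigitsPlus]
          · have hlen : rest.length ≠ 0 := by simpa using hr
            simp [hlen, pvWhileA_eq_all, pvDigitsPlus, hr]
        · have hs' : (c = '+' || c = '-') = false := by
            simp only [Bool.or_eq_false_iff]
            constructor <;> (simp only [decide_eq_false_iff_not]; tauto)
          simp [hs, hs', pvWhileA_eq_all, pvDigitsPlus]
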